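-- pv_equiv track=rewrite | github.com/B20DCCN728/Python_PTIT | PY01059_Tong_Chu_So_Tich_Chu_So.py | Solve
-- ===== SOURCE A (Python) =====
-- def Solve(solve):
--     n = len(solve)
--     sum = 0
--     pro = 1
--     ok = 0
--     for i in range(0, n):
--         if i % 2 == 0: sum += int(solve[i])
--         else:
--             if solve[i] == '0': continue
--             else:
--                 ok = 1
--                 pro *= int(solve[i])
--     if ok == 1: return sum, pro
--     else: return sum, 0
-- ===== SOURCE B (Python) =====
-- def Solve(solve):
--     s = sum(int(d) for d in solve[0::2])
--     odds = [int(d) for d in solve[1::2] if d != '0']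
--     p = 1
--     for d in odds:
--         p *= d
--     return s, (p if odds else 0)
-- ===== Notes on version B (the rewrite author's own statement) =====
-- stated objective: idiomatic
-- what changed: B replaces A's single indexed loop with its i%2 test and ok flag by staged passes over the two stride-2 slices: sum(int(d) for d in solve[0::2]), a materialized list of the nonzero odd-slice digits, a product fold over that list, and an emptiness check instead of the flag.
import Mathlib
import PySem

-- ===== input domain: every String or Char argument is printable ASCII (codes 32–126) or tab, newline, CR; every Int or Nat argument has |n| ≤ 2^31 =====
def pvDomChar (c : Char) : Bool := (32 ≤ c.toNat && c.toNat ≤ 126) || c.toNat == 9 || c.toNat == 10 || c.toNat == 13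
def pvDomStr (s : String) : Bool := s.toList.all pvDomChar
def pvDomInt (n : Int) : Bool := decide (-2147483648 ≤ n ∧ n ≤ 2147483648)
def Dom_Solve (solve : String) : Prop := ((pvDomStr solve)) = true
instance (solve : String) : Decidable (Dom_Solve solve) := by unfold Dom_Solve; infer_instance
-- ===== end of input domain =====

-- B replaces A's single indexed loop (parity test + ok flag) by staged passes over the two
-- stride-2 slices: sum the even slice, filter-map the odd slice to its nonzero digits, fold
-- that list into a product, and return 0 for the product when that list is empty.

-- int(c) for a one-character string c (0 default is unreachable under Pre_Solve)
def pvDigit (c : Char) : Int := (PySem.Int.ofChars? [c]).getD 0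

-- ===== PORT A =====
-- the loop body of A: state (sum, pro, ok), input (index, character)
def pvStepA (acc : Int × Int × Int) (ic : Int × Char) : Int × Int × Int :=
  if PySem.Int.mod ic.1 2 == 0 then (acc.1 + pvDigit ic.2, acc.2.1, acc.2.2)
  else if ic.2 == '0' then acc
  else (acc.1, acc.2.1 * pvDigit ic.2, 1)

def Solve (solve : String) : Int × Int :=
  let st := (PySem.List.enumerate solve.toList 0).foldl pvStepA (0, 1, 0)
  if st.2.2 == 1 then (st.1, st.2.1) else (st.1, 0)

-- ===== PORT B =====
def Solve_alt (solve : String) : Int × Int :=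
  let cs := solve.toList
  -- solve[0::2] / solve[1::2]; the step 2 is never 0, so slice? is always some (getD only totalises)
  let s := (((PySem.List.slice? cs (some 0) none 2).getD []).map pvDigit).sum
  let odds := ((PySem.List.slice? cs (some 1) none 2).getD []).filterMap
                (fun d => if d ≠ '0' then some (pvDigit d) else none)
  let p := odds.foldl (· * ·) 1
  (s, if odds.isEmpty then 0 else p)

-- ===== PRECONDITION & SPEC =====
-- exactly the inputs where Python A returns: every character must be a decimal digit
-- (int(solve[i]) raises ValueError otherwise)
def Pre_Solve (solve : String) : Prop := (solve.toList.all Char.isDigit) = true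
instance (solve : String) : Decidable (Pre_Solve solve) := by unfold Pre_Solve; infer_instance
def pvWitness_Solve : String := "12"

def Spec_Solve (solve : String) (out : Int × Int) : Prop := out = Solve_alt solve
instance (solve : String) (out : Int × Int) : Decidable (Spec_Solve solve out) := by unfold Spec_Solve; infer_instance

-- ===== CLAIM (what is proved, stated in full; the proofs are below) =====
def Claim_equal_Solve : Prop := ∀ (solve : String), Dom_Solve solve → Pre_Solve solve → Spec_Solve solve (Solve solve)

-- ===== LEMMAS AND PROOFS =====

-- every second element starting at the head: xs[0::2]
def pvEvens {α : Type} : List α → List α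
  | [] => []
  | [a] => [a]
  | a :: _ :: r => a :: pvEvens r

-- the nonzero odd-position digits of cs (xs[1::2] filtered), as B computes them
def pvOddsOf (cs : List Char) : List Int :=
  (pvEvens cs.tail).filterMap (fun d => if d ≠ '0' then some (pvDigit d) else none)

-- slice? with start 0/1, no stop, step 2, reduced to its filterMap/range core
theorem pvSliceCore {α : Type} (xs : List α) (s : Int) (hs : 0 ≤ s) :
    PySem.List.slice? xs (some s) none 2 =
      some (List.filterMap
        (fun k : Nat => xs[(min s (xs.length : Int) + 2 * (k : Int)).toNat]?)
        (List.range (if s < (xs.length : Int)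
          then (((xs.length : Int) - min s (xs.length : Int) + 2 - 1) / 2).toNat else 0))) := by
  simp only [PySem.List.slice?, PySem.List.sliceIndices]
  norm_num [not_lt.mpr hs]

theorem pvCore_cons2 {α : Type} (a b : α) (r : List α) (m : Nat) :
    List.filterMap (fun k : Nat => (a :: b :: r)[(0 + 2 * (k : Int)).toNat]?) (List.range (m + 1)) =
      a :: List.filterMap (fun k : Nat => r[(0 + 2 * (k : Int)).toNat]?) (List.range m) := by
  rw [List.range_succ_eq_map, List.filterMap_cons, List.filterMap_map]
  simp only [Int.natCast_zero, mul_zero, add_zero, Int.toNat_zero, List.getElem?_cons_zero]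
  refine congrArg (a :: ·) (List.filterMap_congr ?_)
  intro k _
  show (a :: b :: r)[((0:Int) + 2 * ((k:Nat).succ : Int)).toNat]? = r[((0:Int) + 2 * (k:Int)).toNat]?
  have h1 : ((0:Int) + 2 * ((k:Nat).succ : Int)).toNat = (2 * k + 1) + 1 := by
    push_cast; omega
  have h2 : ((0:Int) + 2 * (k:Int)).toNat = 2 * k := by omega
  rw [h1, h2, List.getElem?_cons_succ, List.getElem?_cons_succ]

-- the zero-start core computes pvEvens
theorem pvCoreEvens {α : Type} : ∀ (xs : List α),
    List.filterMap (fun k : Nat => xs[(0 + 2 * (k : Int)).toNat]?)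
      (List.range (if (0:Int) < (xs.length : Int)
        then (((xs.length : Int) - min 0 (xs.length : Int) + 2 - 1) / 2).toNat else 0)) = pvEvens xs
  | [] => by simp [pvEvens]
  | [a] => by norm_num [pvEvens, List.range_succ, List.filterMap]
  | a :: b :: r => by
    have ih := pvCoreEvens r
    have hcnt : (if (0:Int) < ((a :: b :: r).length : Int)
        then ((((a :: b :: r).length : Int) - min 0 ((a :: b :: r).length : Int) + 2 - 1) / 2).toNat else 0)
        = (if (0:Int) < (r.length : Int)
        then (((r.length : Int) - min 0 (r.length : Int) + 2 - 1) / 2).toNat else 0) + 1 := by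
      simp only [List.length_cons]
      split_ifs with h1 h2 <;> push_cast <;> omega
    rw [hcnt, pvCore_cons2, ih, pvEvens]

theorem pvSlice0 {α : Type} (xs : List α) :
    PySem.List.slice? xs (some 0) none 2 = some (pvEvens xs) := by
  rw [pvSliceCore xs 0 (le_refl 0), ← pvCoreEvens xs]
  have hmin : min (0:Int) (xs.length : Int) = 0 := min_eq_left (by positivity)
  simp only [hmin]

theorem pvSlice1 {α : Type} (xs : List α) :
    PySem.List.slice? xs (some 1) none 2 = some (pvEvens xs.tail) := by
  match xs with
  | [] => rfl
  | a :: r =>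
    rw [pvSliceCore (a :: r) 1 (by norm_num), List.tail_cons, ← pvCoreEvens r]
    have hmin : min (1:Int) ((a :: r).length : Int) = 1 := by
      simp only [List.length_cons]; omega
    simp only [hmin]
    congr 1
    have hcnt : (if (1:Int) < ((a :: r).length : Int)
        then ((((a :: r).length : Int) - 1 + 2 - 1) / 2).toNat else 0)
        = (if (0:Int) < (r.length : Int)
        then (((r.length : Int) - min 0 (r.length : Int) + 2 - 1) / 2).toNat else 0) := by
      simp only [List.length_cons]
      split_ifs with h1 h2 <;> push_cast <;> omega
    rw [hcnt]
    apply List.filterMap_congr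
    intro k _
    have h1 : ((1:Int) + 2 * (k:Int)).toNat = (2 * k) + 1 := by omega
    have h2 : ((0:Int) + 2 * (k:Int)).toNat = 2 * k := by omega
    rw [h1, h2, List.getElem?_cons_succ]

theorem pvEvens_cons {α : Type} (x : α) (l : List α) : pvEvens (x :: l) = x :: pvEvens l.tail := by
  cases l <;> rfl

theorem pvOdds_cons2 (e o : Char) (rest : List Char) :
    pvOddsOf (e :: o :: rest) = (if o ≠ '0' then [pvDigit o] else []) ++ pvOddsOf rest := by
  by_cases h : o = '0' <;> simp [pvOddsOf, pvEvens_cons, h]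

theorem pvFoldMul (l : List Int) (a : Int) : l.foldl (· * ·) a = a * l.foldl (· * ·) 1 := by
  induction l generalizing a with
  | nil => simp
  | cons x l ih => simp only [List.foldl_cons, one_mul]; rw [ih (a * x), ih x, mul_assoc]

-- A's indexed fold, from any even start index, in terms of B's slice data
theorem pvKey : (cs : List Char) → (s sum pro ok : Int) → s % 2 = 0 →
    (PySem.List.enumerate cs s).foldl pvStepA (sum, pro, ok) =
      (sum + ((pvEvens cs).map pvDigit).sum,
       pro * (pvOddsOf cs).foldl (· * ·) 1,
       if (pvOddsOf cs).isEmpty then ok else 1)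
  | [], s, sum, pro, ok, hs => by
    simp [PySem.List.enumerate_nil, pvEvens, pvOddsOf]
  | [c], s, sum, pro, ok, hs => by
    have he : (PySem.Int.mod s 2 == 0) = true := by
      rw [PySem.Int.mod_eq_emod_of_pos (by omega)]; simp; omega
    simp only [PySem.List.enumerate_cons, PySem.List.enumerate_nil, List.foldl_cons,
      List.foldl_nil, pvStepA, he, if_true]
    simp [pvEvens, pvOddsOf]
  | e :: o :: rest, s, sum, pro, ok, hs => by
    have he : (PySem.Int.mod s 2 == 0) = true := by
      rw [PySem.Int.mod_eq_emod_of_pos (by omega)]; simp; omega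
    have hodd : (PySem.Int.mod (s + 1) 2 == 0) = false := by
      rw [PySem.Int.mod_eq_emod_of_pos (by omega)]; simp; omega
    rw [PySem.List.enumerate_cons, PySem.List.enumerate_cons]
    simp only [List.foldl_cons]
    have hstep1 : pvStepA (sum, pro, ok) (s, e) = (sum + pvDigit e, pro, ok) := by
      simp only [pvStepA, he, if_true]
    rw [hstep1]
    have hs2 : s + 1 + 1 = s + 2 := by ring
    by_cases ho : o = '0'
    · have hstep2 : pvStepA (sum + pvDigit e, pro, ok) (s + 1, o) = (sum + pvDigit e, pro, ok) := by
        simp only [pvStepA, hodd, Bool.false_eq_true, if_false, ho]; simp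
      rw [hstep2, hs2, pvKey rest (s + 2) (sum + pvDigit e) pro ok (by omega)]
      rw [pvOdds_cons2]
      simp [ho, pvEvens]
      ring
    · have hstep2 : pvStepA (sum + pvDigit e, pro, ok) (s + 1, o) =
          (sum + pvDigit e, pro * pvDigit o, 1) := by
        simp only [pvStepA, hodd, Bool.false_eq_true, if_false]; simp [ho]
      rw [hstep2, hs2, pvKey rest (s + 2) (sum + pvDigit e) (pro * pvDigit o) 1 (by omega)]
      rw [pvOdds_cons2]
      simp [ho, pvEvens]
      refine ⟨by ring, ?_⟩
      rw [pvFoldMul _ (pvDigit o)]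
      ring

-- ===== VERDICT (by name: the statement is the Claim_ definition above) =====
theorem Solve_spec : Claim_equal_Solve := by
  intro solve _ _
  unfold Spec_Solve Solve Solve_alt
  simp only [pvKey solve.toList 0 0 1 0 (by omega), pvSlice0, pvSlice1, Option.getD_some]
  by_cases h : (pvOddsOf solve.toList).isEmpty
  · simp [pvOddsOf] at h ⊢
    rw [if_neg (by push Not; exact h), if_pos h]
  · simp [pvOddsOf] at h ⊢
    rw [if_pos h, if_neg (by push Not; exact h)]
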